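-- pv_equiv track=rewrite | github.com/lan17/homesec | src/homesec/plugins/notifiers/home_assistant.py | _normalize_detected_objects
-- ===== SOURCE A (Python) =====
-- _OBJECT_ORDER = ("person", "vehicle", "animal", "package", "object", "unknown")
--
-- _PERSON_CLASSES = {"person", "human"}
--
-- _VEHICLE_CLASSES = {
--     "car",
--     "truck",
--     "bus",
--     "motorcycle",
--     "motorbike",
--     "bicycle",
--     "bike",
--     "scooter",
--     "van",
--     "vehicle",
--     "train",
--     "boat",
--     "ship",
--     "airplane",
-- }
--
-- _ANIMAL_CLASSES = {
--     "dog",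
--     "cat",
--     "bird",
--     "horse",
--     "sheep",
--     "cow",
--     "bear",
--     "zebra",
--     "giraffe",
--     "animal",
-- }
--
-- _PACKAGE_CLASSES = {"package", "parcel", "box", "bag"}
--
-- def _normalize_detected_objects(detected_classes: list[str] | None) -> list[str]:
--     if not detected_classes:
--         return []
--
--     found: set[str] = set()
--     for class_name in detected_classes:
--         key = class_name.strip().lower()
--         if key in _PERSON_CLASSES:
--             found.add("person")
--         elif key in _VEHICLE_CLASSES:
--             found.add("vehicle")
--         elif key in _ANIMAL_CLASSES:
--             found.add("animal")
--         elif key in _PACKAGE_CLASSES: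
--             found.add("package")
--         elif key == "unknown":
--             found.add("unknown")
--         else:
--             found.add("object")
--
--     return [category for category in _OBJECT_ORDER if category in found]
-- ===== SOURCE B (Python) =====
-- _CATEGORY_KEYS = (
--     ("person", frozenset({"person", "human"})),
--     ("vehicle", frozenset({
--         "car", "truck", "bus", "motorcycle", "motorbike", "bicycle", "bike",
--         "scooter", "van", "vehicle", "train", "boat", "ship", "airplane"})),
--     ("animal", frozenset({
--         "dog", "cat", "bird", "horse", "sheep", "cow", "bear", "zebra",
--         "giraffe", "animal"})),
--     ("package", frozenset({"package", "parcel", "box", "bag"})),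
-- )
--
-- _KNOWN = frozenset(k for _, ks in _CATEGORY_KEYS for k in ks) | {"unknown"}
--
--
-- def _normalize_detected_objects(detected_classes):
--     if not detected_classes:
--         return []
--     keys = [c.strip().lower() for c in detected_classes]
--     # category-major: walk the output order once, testing each category
--     # for an intersection with the normalized keys
--     out = [cat for cat, ks in _CATEGORY_KEYS if any(k in ks for k in keys)]
--     if any(k not in _KNOWN for k in keys):
--         out.append("object")
--     if "unknown" in keys:
--         out.append("unknown")
--     return out
-- ===== Notes on version B (the rewrite author's own statement) =====
-- stated objective: alternative
-- what changed: B inverts the iteration: instead of classifying each detected item through a membership chain into an accumulated set and then filtering the order list, it walks the fixed category order once and emits each category whose key set intersects the normalized keys, appending 'object'/'unknown' from two direct scans; no per-item classification and no set accumulator.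
import Mathlib
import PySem

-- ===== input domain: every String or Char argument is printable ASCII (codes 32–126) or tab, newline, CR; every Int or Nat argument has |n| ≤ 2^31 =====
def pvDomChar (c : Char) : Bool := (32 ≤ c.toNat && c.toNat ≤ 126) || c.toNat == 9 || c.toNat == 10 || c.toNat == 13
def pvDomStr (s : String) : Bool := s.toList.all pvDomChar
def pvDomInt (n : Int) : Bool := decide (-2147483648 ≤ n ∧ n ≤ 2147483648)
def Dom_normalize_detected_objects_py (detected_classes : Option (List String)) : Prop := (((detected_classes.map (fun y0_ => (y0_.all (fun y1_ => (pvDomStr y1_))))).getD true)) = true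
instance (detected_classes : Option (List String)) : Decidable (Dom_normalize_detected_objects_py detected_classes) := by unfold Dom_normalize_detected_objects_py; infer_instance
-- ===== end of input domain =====

-- B inverts the iteration: instead of classifying each detected item into an
-- accumulated set and filtering the order list, it walks the output order once
-- and tests each category for an intersection with the normalized keys;
-- objective: alternative (category-major instead of item-major).

-- ===== PORT A =====
def pvObjectOrder : List String := ["person", "vehicle", "animal", "package", "object", "unknown"]
def pvPersonClasses : PySem.Set String := PySem.Set.ofList ["person", "human"]
def pvVehicleClasses : PySem.Set String := PySem.Set.ofList ["car", "truck", "bus", "motorcycle", "motorbike", "bicycle", "bike", "scooter", "van", "vehicle", "train", "boat", "ship", "airplane"]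
def pvAnimalClasses : PySem.Set String := PySem.Set.ofList ["dog", "cat", "bird", "horse", "sheep", "cow", "bear", "zebra", "giraffe", "animal"]
def pvPackageClasses : PySem.Set String := PySem.Set.ofList ["package", "parcel", "box", "bag"]

def normalize_detected_objects_py (detected_classes : Option (List String)) : List String :=
  match detected_classes with
  | none => []
  | some cs =>
    if cs = [] then []
    else
      let found : PySem.Set String := cs.foldl (fun found class_name =>
        let key := PySem.Str.lower (PySem.Str.strip class_name)
        if PySem.Set.contains pvPersonClasses key then PySem.Set.add found "person"
        else if PySem.Set.contains pvVehicleClasses key then PySem.Set.add found "vehicle"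
        else if PySem.Set.contains pvAnimalClasses key then PySem.Set.add found "animal"
        else if PySem.Set.contains pvPackageClasses key then PySem.Set.add found "package"
        else if key == "unknown" then PySem.Set.add found "unknown"
        else PySem.Set.add found "object") PySem.Set.empty
      pvObjectOrder.filter (fun category => PySem.Set.contains found category)

-- ===== PORT B =====
def pvCategoryKeys : List (String × PySem.Set String) :=
  [("person", PySem.Set.ofList ["person", "human"]),
   ("vehicle", PySem.Set.ofList ["car", "truck", "bus", "motorcycle", "motorbike", "bicycle", "bike", "scooter", "van", "vehicle", "train", "boat", "ship", "airplane"]),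
   ("animal", PySem.Set.ofList ["dog", "cat", "bird", "horse", "sheep", "cow", "bear", "zebra", "giraffe", "animal"]),
   ("package", PySem.Set.ofList ["package", "parcel", "box", "bag"])]

def pvKnown : PySem.Set String :=
  PySem.Set.union (PySem.Set.ofList (pvCategoryKeys.flatMap (fun p => p.2))) ["unknown"]

def normalize_detected_objects_py_alt (detected_classes : Option (List String)) : List String :=
  match detected_classes with
  | none => []
  | some cs =>
    if cs = [] then []
    else
      let keys := cs.map (fun c => PySem.Str.lower (PySem.Str.strip c))
      -- category-major: walk the output order, testing each category for an intersection
      let out := (pvCategoryKeys.filter (fun p => keys.any (fun k => PySem.Set.contains p.2 k))).map (fun p => p.1)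
      let out := if keys.any (fun k => !(PySem.Set.contains pvKnown k)) then out ++ ["object"] else out
      if keys.contains "unknown" then out ++ ["unknown"] else out

-- ===== PRECONDITION & SPEC =====
def Spec_normalize_detected_objects_py (detected_classes : Option (List String)) (out : List String) : Prop := out = normalize_detected_objects_py_alt detected_classes
instance (detected_classes : Option (List String)) (out : List String) : Decidable (Spec_normalize_detected_objects_py detected_classes out) := by unfold Spec_normalize_detected_objects_py; infer_instance

-- ===== CLAIM (what is proved, stated in full; the proofs are below) =====
def Claim_equal_normalize_detected_objects_py : Prop := ∀ (detected_classes : Option (List String)), Dom_normalize_detected_objects_py detected_classes → Spec_normalize_detected_objects_py detected_classes (normalize_detected_objects_py detected_classes)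

-- ===== LEMMAS AND PROOFS =====

-- the category A's branch chain assigns to a normalized key
def pvCatA (key : String) : String :=
  if PySem.Set.contains pvPersonClasses key then "person"
  else if PySem.Set.contains pvVehicleClasses key then "vehicle"
  else if PySem.Set.contains pvAnimalClasses key then "animal"
  else if PySem.Set.contains pvPackageClasses key then "package"
  else if key == "unknown" then "unknown"
  else "object"

-- A's loop body as a named function (definitionally the lambda in the port)
def pvStep (found : PySem.Set String) (class_name : String) : PySem.Set String :=
  let key := PySem.Str.lower (PySem.Str.strip class_name)
  if PySem.Set.contains pvPersonClasses key then PySem.Set.add found "person"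
  else if PySem.Set.contains pvVehicleClasses key then PySem.Set.add found "vehicle"
  else if PySem.Set.contains pvAnimalClasses key then PySem.Set.add found "animal"
  else if PySem.Set.contains pvPackageClasses key then PySem.Set.add found "package"
  else if key == "unknown" then PySem.Set.add found "unknown"
  else PySem.Set.add found "object"

def pvAllKeys : List String := ["person", "human", "car", "truck", "bus", "motorcycle", "motorbike", "bicycle", "bike", "scooter", "van", "vehicle", "train", "boat", "ship", "airplane", "dog", "cat", "bird", "horse", "sheep", "cow", "bear", "zebra", "giraffe", "animal", "package", "parcel", "box", "bag", "unknown"]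

theorem pvStep_eq_add (found : PySem.Set String) (cn : String) :
    pvStep found cn = PySem.Set.add found (pvCatA (PySem.Str.lower (PySem.Str.strip cn))) := by
  simp only [pvStep, pvCatA]
  split_ifs <;> rfl

theorem pvFound_mem (cs : List String) (init : PySem.Set String) (c : String) :
    (cs.foldl pvStep init).contains c
    = (init.contains c || cs.any (fun cn => pvCatA (PySem.Str.lower (PySem.Str.strip cn)) == c)) := by
  induction cs generalizing init with
  | nil => simp
  | cons hd tl ih =>
    simp only [List.foldl_cons, List.any_cons, pvStep_eq_add, ih]
    have hstep : (PySem.Set.add init (pvCatA (PySem.Str.lower (PySem.Str.strip hd)))).contains c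
        = (init.contains c || pvCatA (PySem.Str.lower (PySem.Str.strip hd)) == c) := by
      simp [PySem.Set.contains, PySem.Set.mem_add, beq_eq_decide, @eq_comm String]
    rw [hstep]
    cases init.contains c <;> simp

-- what each of B's six category tests says about a single normalized key,
-- phrased as A's classification
theorem pvCat_pointwise (k : String) :
    ((pvCatA k == "person") = PySem.Set.contains pvPersonClasses k) ∧
    ((pvCatA k == "vehicle") = PySem.Set.contains pvVehicleClasses k) ∧
    ((pvCatA k == "animal") = PySem.Set.contains pvAnimalClasses k) ∧
    ((pvCatA k == "package") = PySem.Set.contains pvPackageClasses k) ∧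
    ((pvCatA k == "object") = !(PySem.Set.contains pvKnown k)) ∧
    ((pvCatA k == "unknown") = (k == "unknown")) := by
  by_cases h : k ∈ pvAllKeys
  · simp only [pvAllKeys, List.mem_cons, List.not_mem_nil, or_false] at h
    rcases h with rfl|rfl|rfl|rfl|rfl|rfl|rfl|rfl|rfl|rfl|rfl|rfl|rfl|rfl|rfl|rfl|rfl|rfl|rfl|rfl|rfl|rfl|rfl|rfl|rfl|rfl|rfl|rfl|rfl|rfl|rfl <;> decide
  · simp only [pvAllKeys, List.mem_cons, List.not_mem_nil, or_false, not_or] at h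
    obtain ⟨h1,h2,h3,h4,h5,h6,h7,h8,h9,h10,h11,h12,h13,h14,h15,h16,h17,h18,h19,h20,h21,h22,h23,h24,h25,h26,h27,h28,h29,h30,h31⟩ := h
    have hp : k ∉ pvPersonClasses := by
      simp [show pvPersonClasses = ["person", "human"] from rfl, h1, h2]
    have hv : k ∉ pvVehicleClasses := by
      simp [show pvVehicleClasses = ["car", "truck", "bus", "motorcycle", "motorbike", "bicycle", "bike", "scooter", "van", "vehicle", "train", "boat", "ship", "airplane"] from rfl, h3, h4, h5, h6, h7, h8, h9, h10, h11, h12, h13, h14, h15, h16]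
    have ha : k ∉ pvAnimalClasses := by
      simp [show pvAnimalClasses = ["dog", "cat", "bird", "horse", "sheep", "cow", "bear", "zebra", "giraffe", "animal"] from rfl, h17, h18, h19, h20, h21, h22, h23, h24, h25, h26]
    have hpk : k ∉ pvPackageClasses := by
      simp [show pvPackageClasses = ["package", "parcel", "box", "bag"] from rfl, h27, h28, h29, h30]
    have hkn : k ∉ pvKnown := by
      simp [show pvKnown = pvAllKeys from rfl, pvAllKeys, h1, h2, h3, h4, h5, h6, h7, h8, h9, h10, h11, h12, h13, h14, h15, h16, h17, h18, h19, h20, h21, h22, h23, h24, h25, h26, h27, h28, h29, h30, h31]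
    simp [pvCatA, PySem.Set.contains, hp, hv, ha, hpk, hkn, h31]

-- the common normal form: the output assembled from the six category flags
def pvAsm (b1 b2 b3 b4 b5 b6 : Bool) : List String :=
  (if b1 then ["person"] else []) ++ (if b2 then ["vehicle"] else []) ++
  (if b3 then ["animal"] else []) ++ (if b4 then ["package"] else []) ++
  (if b5 then ["object"] else []) ++ (if b6 then ["unknown"] else [])

theorem pvAside (p : String → Bool) :
    pvObjectOrder.filter p
    = pvAsm (p "person") (p "vehicle") (p "animal") (p "package") (p "object") (p "unknown") := by
  cases g1 : p "person" <;> cases g2 : p "vehicle" <;> cases g3 : p "animal" <;>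
    cases g4 : p "package" <;> cases g5 : p "object" <;> cases g6 : p "unknown" <;>
    simp [pvObjectOrder, pvAsm, List.filter, g1, g2, g3, g4, g5, g6]

theorem pvBside (keys : List String) :
    (let out := (pvCategoryKeys.filter (fun p => keys.any (fun k => PySem.Set.contains p.2 k))).map (fun p => p.1)
     let out := if keys.any (fun k => !(PySem.Set.contains pvKnown k)) then out ++ ["object"] else out
     if keys.contains "unknown" then out ++ ["unknown"] else out)
    = pvAsm (keys.any (fun k => PySem.Set.contains pvPersonClasses k))
            (keys.any (fun k => PySem.Set.contains pvVehicleClasses k))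
            (keys.any (fun k => PySem.Set.contains pvAnimalClasses k))
            (keys.any (fun k => PySem.Set.contains pvPackageClasses k))
            (keys.any (fun k => !(PySem.Set.contains pvKnown k)))
            (keys.any (fun k => k == "unknown")) := by
  cases g1 : keys.any (fun k => PySem.Set.contains pvPersonClasses k) <;>
    cases g2 : keys.any (fun k => PySem.Set.contains pvVehicleClasses k) <;>
    cases g3 : keys.any (fun k => PySem.Set.contains pvAnimalClasses k) <;>
    cases g4 : keys.any (fun k => PySem.Set.contains pvPackageClasses k) <;>
    cases g5 : keys.any (fun k => !(PySem.Set.contains pvKnown k)) <;>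
    by_cases g6 : "unknown" ∈ keys <;>
    simp only [PySem.Set.contains, List.contains_eq_mem] at g1 g2 g3 g4 g5 <;>
    simp [pvCategoryKeys, pvAsm, List.filter, List.any_eq_true, beq_iff_eq,
      show PySem.Set.ofList ["person", "human"] = pvPersonClasses from rfl,
      show PySem.Set.ofList ["car", "truck", "bus", "motorcycle", "motorbike", "bicycle", "bike", "scooter", "van", "vehicle", "train", "boat", "ship", "airplane"] = pvVehicleClasses from rfl,
      show PySem.Set.ofList ["dog", "cat", "bird", "horse", "sheep", "cow", "bear", "zebra", "giraffe", "animal"] = pvAnimalClasses from rfl,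
      show PySem.Set.ofList ["package", "parcel", "box", "bag"] = pvPackageClasses from rfl,
      g1, g2, g3, g4, g6]

-- ===== VERDICT (by name: the statement is the Claim_ definition above) =====
set_option maxHeartbeats 1000000 in
theorem normalize_detected_objects_py_spec : Claim_equal_normalize_detected_objects_py := by
  intro dc _
  unfold Spec_normalize_detected_objects_py normalize_detected_objects_py normalize_detected_objects_py_alt
  cases dc with
  | none => rfl
  | some cs =>
    by_cases h : cs = []
    · simp [h]
    · simp only [h, if_false]
      rw [show (fun (found : PySem.Set String) class_name =>
        let key := PySem.Str.lower (PySem.Str.strip class_name)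
        if PySem.Set.contains pvPersonClasses key then PySem.Set.add found "person"
        else if PySem.Set.contains pvVehicleClasses key then PySem.Set.add found "vehicle"
        else if PySem.Set.contains pvAnimalClasses key then PySem.Set.add found "animal"
        else if PySem.Set.contains pvPackageClasses key then PySem.Set.add found "package"
        else if key == "unknown" then PySem.Set.add found "unknown"
        else PySem.Set.add found "object") = pvStep from rfl]
      have hmem : ∀ c, PySem.Set.contains (cs.foldl pvStep PySem.Set.empty) c
          = cs.any (fun cn => pvCatA (PySem.Str.lower (PySem.Str.strip cn)) == c) := by
        intro c
        rw [show PySem.Set.contains (cs.foldl pvStep PySem.Set.empty) c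
            = (cs.foldl pvStep PySem.Set.empty).contains c from rfl, pvFound_mem]
        simp [PySem.Set.contains, PySem.Set.empty]
      have hanymap : ∀ (p : String → Bool),
          (cs.map (fun c => PySem.Str.lower (PySem.Str.strip c))).any p
          = cs.any (fun cn => p (PySem.Str.lower (PySem.Str.strip cn))) := by
        intro p; rw [List.any_map]; rfl
      refine Eq.trans (pvAside _) (Eq.trans ?_ (pvBside (cs.map (fun c => PySem.Str.lower (PySem.Str.strip c)))).symm)
      rw [hmem "person", hmem "vehicle", hmem "animal", hmem "package", hmem "object", hmem "unknown",
        hanymap, hanymap, hanymap, hanymap, hanymap, hanymap]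
      have e1 : (cs.any fun cn => pvCatA (PySem.Str.lower (PySem.Str.strip cn)) == "person")
          = cs.any fun cn => PySem.Set.contains pvPersonClasses (PySem.Str.lower (PySem.Str.strip cn)) :=
        List.any_congr rfl (fun x => (pvCat_pointwise _).1)
      have e2 : (cs.any fun cn => pvCatA (PySem.Str.lower (PySem.Str.strip cn)) == "vehicle")
          = cs.any fun cn => PySem.Set.contains pvVehicleClasses (PySem.Str.lower (PySem.Str.strip cn)) :=
        List.any_congr rfl (fun x => (pvCat_pointwise _).2.1)
      have e3 : (cs.any fun cn => pvCatA (PySem.Str.lower (PySem.Str.strip cn)) == "animal")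
          = cs.any fun cn => PySem.Set.contains pvAnimalClasses (PySem.Str.lower (PySem.Str.strip cn)) :=
        List.any_congr rfl (fun x => (pvCat_pointwise _).2.2.1)
      have e4 : (cs.any fun cn => pvCatA (PySem.Str.lower (PySem.Str.strip cn)) == "package")
          = cs.any fun cn => PySem.Set.contains pvPackageClasses (PySem.Str.lower (PySem.Str.strip cn)) :=
        List.any_congr rfl (fun x => (pvCat_pointwise _).2.2.2.1)
      have e5 : (cs.any fun cn => pvCatA (PySem.Str.lower (PySem.Str.strip cn)) == "object")
          = cs.any fun cn => !(PySem.Set.contains pvKnown (PySem.Str.lower (PySem.Str.strip cn))) :=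
        List.any_congr rfl (fun x => (pvCat_pointwise _).2.2.2.2.1)
      have e6 : (cs.any fun cn => pvCatA (PySem.Str.lower (PySem.Str.strip cn)) == "unknown")
          = cs.any fun cn => (PySem.Str.lower (PySem.Str.strip cn)) == "unknown" :=
        List.any_congr rfl (fun x => (pvCat_pointwise _).2.2.2.2.2)
      rw [e1, e2, e3, e4, e5, e6]
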